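-- pv_equiv track=rewrite | github.com/LittleIowaBoy/dungeon | terrain_layouts.py | _door_buffer_mask
-- ===== SOURCE A (Python) =====
-- def _door_tile_set(grid, doors: dict) -> set:
--     """Return (col, row) positions of all open door tiles.
--
--     Derives room dimensions from *grid* so this module never imports
--     ROOM_ROWS, ROOM_COLS, or DOOR_WIDTH directly.  Door width = 3 tiles
--     (half=1) centred on the room's mid column / mid row.
--     """
--     rows = len(grid)
--     cols = len(grid[0]) if rows else 0
--     mid_col = cols // 2
--     mid_row = rows // 2
--     result: set = set()
--     for dc in (-1, 0, 1):
--         if doors.get("top"):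
--             result.add((mid_col + dc, 0))
--         if doors.get("bottom"):
--             result.add((mid_col + dc, rows - 1))
--     for dr in (-1, 0, 1):
--         if doors.get("left"):
--             result.add((0, mid_row + dr))
--         if doors.get("right"):
--             result.add((cols - 1, mid_row + dr))
--     return result
--
-- def _door_buffer_mask(grid, doors: dict, radius: int = 2) -> set:
--     """Return the set of (col, row) cells within *radius* Chebyshev distance
--     of any open door tile.  Pattern functions use this to leave doorways clear.
--     """
--     rows = len(grid)
--     cols = len(grid[0]) if rows else 0
--     mask: set = set()
--     for door_col, door_row in _door_tile_set(grid, doors):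
--         for dr in range(-radius, radius + 1):
--             for dc in range(-radius, radius + 1):
--                 nr, nc = door_row + dr, door_col + dc
--                 if 0 <= nr < rows and 0 <= nc < cols:
--                     mask.add((nc, nr))
--     return mask
-- ===== SOURCE B (Python) =====
-- def _door_buffer_mask(grid, doors, radius=2):
--     """Incremental per-strip sweep: a door's three tiles give overlapping
--     Chebyshev squares, so instead of rasterising each tile's full square we
--     sweep each door strip once -- the first tile contributes its whole clipped
--     rectangle, every later tile only the not-yet-swept columns (rows for the
--     side strips); union idempotence makes the skipped cells redundant."""
--     rows = len(grid)
--     cols = len(grid[0]) if rows else 0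
--     mid_col = cols // 2
--     mid_row = rows // 2
--     top = doors.get("top")
--     bottom = doors.get("bottom")
--     left = doors.get("left")
--     right = doors.get("right")
--     mask = set()
--     # horizontal strips (top/bottom doors): sweep the three door columns left to right
--     top_hi = bottom_hi = None
--     for d in (-1, 0, 1):
--         c = mid_col + d
--         if top:
--             start = max(c - radius, 0) if top_hi is None else top_hi + 1
--             top_hi = min(c + radius, cols - 1)
--             for nr in range(max(0 - radius, 0), min(0 + radius, rows - 1) + 1):
--                 for nc in range(start, top_hi + 1):
--                     mask.add((nc, nr))
--         if bottom:
--             start = max(c - radius, 0) if bottom_hi is None else bottom_hi + 1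
--             bottom_hi = min(c + radius, cols - 1)
--             for nr in range(max(rows - 1 - radius, 0), min(rows - 1 + radius, rows - 1) + 1):
--                 for nc in range(start, bottom_hi + 1):
--                     mask.add((nc, nr))
--     # vertical strips (left/right doors): sweep the three door rows top to bottom
--     left_hi = right_hi = None
--     for d in (-1, 0, 1):
--         r = mid_row + d
--         if left:
--             start = max(r - radius, 0) if left_hi is None else left_hi + 1
--             left_hi = min(r + radius, rows - 1)
--             for nr in range(start, left_hi + 1):
--                 for nc in range(max(0 - radius, 0), min(0 + radius, cols - 1) + 1):
--                     mask.add((nc, nr))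
--         if right:
--             start = max(r - radius, 0) if right_hi is None else right_hi + 1
--             right_hi = min(r + radius, rows - 1)
--             for nr in range(start, right_hi + 1):
--                 for nc in range(max(cols - 1 - radius, 0), min(cols - 1 + radius, cols - 1) + 1):
--                     mask.add((nc, nr))
--     return mask
-- ===== Notes on version B (the rewrite author's own statement) =====
-- stated objective: alternative
-- what changed: B drops the intermediate door-tile set and the twelve per-tile (2r+1)^2 bounds-tested square walks: it sweeps each door strip once, rasterising the first tile's clipped rectangle and then only the not-yet-swept columns/rows of each later tile (union idempotence makes the skipped cells redundant), so each mask cell is enumerated about once instead of up to three times.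
import Mathlib
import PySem

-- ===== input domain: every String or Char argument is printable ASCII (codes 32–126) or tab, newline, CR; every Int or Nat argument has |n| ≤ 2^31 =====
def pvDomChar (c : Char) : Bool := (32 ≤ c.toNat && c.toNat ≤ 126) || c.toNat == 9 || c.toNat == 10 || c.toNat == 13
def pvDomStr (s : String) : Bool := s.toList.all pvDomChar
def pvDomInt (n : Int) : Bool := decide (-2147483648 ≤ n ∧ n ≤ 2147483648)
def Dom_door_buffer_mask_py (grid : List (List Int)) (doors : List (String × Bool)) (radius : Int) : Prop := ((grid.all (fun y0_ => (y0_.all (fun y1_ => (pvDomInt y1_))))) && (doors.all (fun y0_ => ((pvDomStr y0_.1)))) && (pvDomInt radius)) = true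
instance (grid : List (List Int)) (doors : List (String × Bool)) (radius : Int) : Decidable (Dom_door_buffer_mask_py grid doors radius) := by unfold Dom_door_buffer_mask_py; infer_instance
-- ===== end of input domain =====

-- B replaces A's twelve per-door-tile (2r+1)^2 bounds-tested square walks by one incremental
-- sweep per door strip (first tile: full clipped rectangle; later tiles: only the fresh
-- columns/rows), exploiting idempotence of set union; return value equivalence is proved.


-- ===== PORT A =====
-- _door_tile_set, helper of A (transliterated)
def door_tile_set (grid : List (List Int)) (doors : List (String × Bool)) : PySem.Set (Int × Int) :=
  let rows : Int := grid.length
  let cols : Int := match grid with | [] => 0 | g0 :: _ => g0.length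
  let mid_col : Int := PySem.Int.floordiv cols 2
  let mid_row : Int := PySem.Int.floordiv rows 2
  let result : PySem.Set (Int × Int) := PySem.Set.empty
  let result := [(-1 : Int), 0, 1].foldl (fun res dc =>
    let res := if PySem.Dict.getD (PySem.Dict.mk doors) "top" false then PySem.Set.add res (mid_col + dc, 0) else res
    if PySem.Dict.getD (PySem.Dict.mk doors) "bottom" false then PySem.Set.add res (mid_col + dc, rows - 1) else res) result
  [(-1 : Int), 0, 1].foldl (fun res dr =>
    let res := if PySem.Dict.getD (PySem.Dict.mk doors) "left" false then PySem.Set.add res (0, mid_row + dr) else res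
    if PySem.Dict.getD (PySem.Dict.mk doors) "right" false then PySem.Set.add res (cols - 1, mid_row + dr) else res) result

def door_buffer_mask_py (grid : List (List Int)) (doors : List (String × Bool)) (radius : Int) : List (Int × Int) :=
  let rows : Int := grid.length
  let cols : Int := match grid with | [] => 0 | g0 :: _ => g0.length
  (door_tile_set grid doors).foldl (fun mask t =>
    (PySem.List.pyRange (-radius) (radius + 1) 1).foldl (fun mask dr =>
      (PySem.List.pyRange (-radius) (radius + 1) 1).foldl (fun mask dc =>
        let nr := t.2 + dr
        let nc := t.1 + dc
        if 0 ≤ nr ∧ nr < rows ∧ 0 ≤ nc ∧ nc < cols then PySem.Set.add mask (nc, nr) else mask)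
        mask) mask) PySem.Set.empty

-- ===== PORT B =====
-- B-side helper: the body of Source B's horizontal loop (top/bottom strips), one iteration
def hStripStep (cols rows mid_col radius : Int) (top bottom : Bool)
    (st : PySem.Set (Int × Int) × Option Int × Option Int) (d : Int) :
    PySem.Set (Int × Int) × Option Int × Option Int :=
  let c := mid_col + d
  let st1 :=
    if top then
      let start := match st.2.1 with | none => max (c - radius) 0 | some h => h + 1
      let hi := min (c + radius) (cols - 1)
      let mask := (PySem.List.pyRange (max (0 - radius) 0) (min (0 + radius) (rows - 1) + 1) 1).foldl
        (fun mask nr => (PySem.List.pyRange start (hi + 1) 1).foldl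
          (fun mask nc => PySem.Set.add mask (nc, nr)) mask) st.1
      (mask, some hi, st.2.2)
    else st
  if bottom then
    let start := match st1.2.2 with | none => max (c - radius) 0 | some h => h + 1
    let hi := min (c + radius) (cols - 1)
    let mask := (PySem.List.pyRange (max (rows - 1 - radius) 0) (min (rows - 1 + radius) (rows - 1) + 1) 1).foldl
      (fun mask nr => (PySem.List.pyRange start (hi + 1) 1).foldl
        (fun mask nc => PySem.Set.add mask (nc, nr)) mask) st1.1
    (mask, st1.2.1, some hi)
  else st1

-- B-side helper: the body of Source B's vertical loop (left/right strips), one iteration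
def vStripStep (cols rows mid_row radius : Int) (left right : Bool)
    (st : PySem.Set (Int × Int) × Option Int × Option Int) (d : Int) :
    PySem.Set (Int × Int) × Option Int × Option Int :=
  let r := mid_row + d
  let st1 :=
    if left then
      let start := match st.2.1 with | none => max (r - radius) 0 | some h => h + 1
      let hi := min (r + radius) (rows - 1)
      let mask := (PySem.List.pyRange start (hi + 1) 1).foldl
        (fun mask nr => (PySem.List.pyRange (max (0 - radius) 0) (min (0 + radius) (cols - 1) + 1) 1).foldl
          (fun mask nc => PySem.Set.add mask (nc, nr)) mask) st.1
      (mask, some hi, st.2.2)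
    else st
  if right then
    let start := match st1.2.2 with | none => max (r - radius) 0 | some h => h + 1
    let hi := min (r + radius) (rows - 1)
    let mask := (PySem.List.pyRange start (hi + 1) 1).foldl
      (fun mask nr => (PySem.List.pyRange (max (cols - 1 - radius) 0) (min (cols - 1 + radius) (cols - 1) + 1) 1).foldl
        (fun mask nc => PySem.Set.add mask (nc, nr)) mask) st1.1
    (mask, st1.2.1, some hi)
  else st1

def door_buffer_mask_py_alt (grid : List (List Int)) (doors : List (String × Bool)) (radius : Int) : List (Int × Int) :=
  let rows : Int := grid.length
  let cols : Int := match grid with | [] => 0 | g0 :: _ => g0.length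
  let mid_col : Int := PySem.Int.floordiv cols 2
  let mid_row : Int := PySem.Int.floordiv rows 2
  let top := PySem.Dict.getD (PySem.Dict.mk doors) "top" false
  let bottom := PySem.Dict.getD (PySem.Dict.mk doors) "bottom" false
  let left := PySem.Dict.getD (PySem.Dict.mk doors) "left" false
  let right := PySem.Dict.getD (PySem.Dict.mk doors) "right" false
  let h := [(-1 : Int), 0, 1].foldl (hStripStep cols rows mid_col radius top bottom) (PySem.Set.empty, none, none)
  let v := [(-1 : Int), 0, 1].foldl (vStripStep cols rows mid_row radius left right) (h.1, none, none)
  v.1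

-- ===== PRECONDITION & SPEC =====
def Spec_door_buffer_mask_py (grid : List (List Int)) (doors : List (String × Bool)) (radius : Int) (out : List (Int × Int)) : Prop := out = door_buffer_mask_py_alt grid doors radius
instance (grid : List (List Int)) (doors : List (String × Bool)) (radius : Int) (out : List (Int × Int)) : Decidable (Spec_door_buffer_mask_py grid doors radius out) := by unfold Spec_door_buffer_mask_py; infer_instance

-- ===== CLAIM (what is proved, stated in full; the proofs are below) =====
def Claim_equal_door_buffer_mask_py : Prop := ∀ (grid : List (List Int)) (doors : List (String × Bool)) (radius : Int), Dom_door_buffer_mask_py grid doors radius → Spec_door_buffer_mask_py grid doors radius (door_buffer_mask_py grid doors radius)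

-- ===== LEMMAS AND PROOFS =====

-- the number of columns A and B both read off the grid
def colsOf (grid : List (List Int)) : Int := match grid with | [] => 0 | g0 :: _ => g0.length


-- the clipped rectangle [clo..chi] × [rlo..rhi] as A and B both enumerate it (rows outer)
def Wrect (rlo rhi clo chi : Int) : List (Int × Int) :=
  (PySem.List.pyRange rlo (rhi + 1) 1).flatMap (fun nr =>
    (PySem.List.pyRange clo (chi + 1) 1).map (fun nc => (nc, nr)))

-- folding one door tile's clipped rectangle into the mask
def wfold (rows cols radius : Int) (mask : PySem.Set (Int × Int)) (t : Int × Int) : PySem.Set (Int × Int) :=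
  (Wrect (max (t.2 - radius) 0) (min (t.2 + radius) (rows - 1)) (max (t.1 - radius) 0)
    (min (t.1 + radius) (cols - 1))).foldl PySem.Set.add mask

-- conditional add inside a foldl = plain Set.add-fold over the filtered, mapped list
theorem foldl_set_add_ite {α β : Type} [BEq α] (l : List β) (p : β → Prop) [DecidablePred p]
    (f : β → α) (m : PySem.Set α) :
    l.foldl (fun m x => if p x then PySem.Set.add m (f x) else m) m
      = ((l.filter (fun x => decide (p x))).map f).foldl PySem.Set.add m := by
  induction l generalizing m with
  | nil => rfl
  | cons a l ih =>
    simp only [List.foldl_cons, List.filter_cons]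
    by_cases h : p a <;> simp [h, ih]

-- a fold of folds is a fold over the flatMap
theorem foldl_set_add_flatMap {α β : Type} [BEq α] (l : List β) (g : β → List α) (m : PySem.Set α) :
    l.foldl (fun m x => (g x).foldl PySem.Set.add m) m = (l.flatMap g).foldl PySem.Set.add m := by
  rw [List.foldl_flatMap]

-- filtering an interval range by an interval predicate clips the bounds
theorem filter_pyRange_interval (a b lo hi : Int) :
    (PySem.List.pyRange a b 1).filter (fun x => decide (lo ≤ x) && decide (x < hi))
      = PySem.List.pyRange (max a lo) (min b hi) 1 := by
  apply List.Perm.eq_of_pairwise (le := (· ≤ ·))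
  · intro x y _ _ h1 h2; omega
  · exact ((PySem.List.pairwise_lt_pyRange_one a b).filter _).imp le_of_lt
  · exact (PySem.List.pairwise_lt_pyRange_one _ _).imp le_of_lt
  · apply List.perm_of_nodup_nodup_toFinset_eq
    · exact (PySem.List.nodup_pyRange_one a b).filter _
    · exact PySem.List.nodup_pyRange_one _ _
    · ext x
      simp [List.mem_toFinset, PySem.List.mem_pyRange_one]
      omega

-- shifting a unit range
theorem map_add_pyRange (a b c : Int) :
    (PySem.List.pyRange a b 1).map (fun x => c + x) = PySem.List.pyRange (c + a) (c + b) 1 := by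
  rw [PySem.List.pyRange_one a b, PySem.List.pyRange_one (c + a) (c + b), List.map_map]
  have : c + b - (c + a) = b - a := by ring
  rw [this]
  apply List.map_congr_left
  intro k _
  simp; ring

-- flatMap with an `if … then … else []` body = flatMap over the filtered list
theorem flatMap_ite_eq_filter {α β : Type} (l : List α) (p : α → Prop) [DecidablePred p] (g : α → List β) :
    l.flatMap (fun x => if p x then g x else []) = (l.filter (fun x => decide (p x))).flatMap g := by
  induction l with
  | nil => rfl
  | cons a l ih =>
    simp only [List.flatMap_cons, List.filter_cons]
    by_cases h : p a <;> simp [h, ih]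

-- the per-tile window of A (filtered square) equals the clipped rectangle
theorem window_eq (radius rows cols dcol drow : Int) :
    (PySem.List.pyRange (-radius) (radius + 1) 1).flatMap (fun dr =>
        if 0 ≤ drow + dr ∧ drow + dr < rows then
          ((PySem.List.pyRange (-radius) (radius + 1) 1).filter
              (fun dc => decide (0 ≤ dcol + dc) && decide (dcol + dc < cols))).map
            (fun dc => (dcol + dc, drow + dr))
        else [])
      = Wrect (max (drow - radius) 0) (min (drow + radius) (rows - 1)) (max (dcol - radius) 0)
          (min (dcol + radius) (cols - 1)) := by
  unfold Wrect
  have hcol : ∀ nr : Int,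
      ((PySem.List.pyRange (-radius) (radius + 1) 1).filter
          (fun dc => decide (0 ≤ dcol + dc) && decide (dcol + dc < cols))).map
        (fun dc => (dcol + dc, nr))
        = (PySem.List.pyRange (max (dcol - radius) 0) (min (dcol + radius) (cols - 1) + 1) 1).map
            (fun nc => (nc, nr)) := by
    intro nr
    have h1 : ((PySem.List.pyRange (-radius) (radius + 1) 1).filter
          (fun dc => decide (0 ≤ dcol + dc) && decide (dcol + dc < cols))).map (fun dc => dcol + dc)
        = PySem.List.pyRange (max (dcol - radius) 0) (min (dcol + radius) (cols - 1) + 1) 1 := by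
      have hc : (fun dc : Int => decide (0 ≤ dcol + dc) && decide (dcol + dc < cols))
          = ((fun x : Int => decide (0 ≤ x) && decide (x < cols)) ∘ (fun dc : Int => dcol + dc)) := rfl
      rw [hc, ← List.filter_map, map_add_pyRange]
      have := filter_pyRange_interval (dcol + -radius) (dcol + (radius + 1)) 0 cols
      convert this using 2 <;> omega
    calc ((PySem.List.pyRange (-radius) (radius + 1) 1).filter
          (fun dc => decide (0 ≤ dcol + dc) && decide (dcol + dc < cols))).map (fun dc => (dcol + dc, nr))
        = (((PySem.List.pyRange (-radius) (radius + 1) 1).filter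
          (fun dc => decide (0 ≤ dcol + dc) && decide (dcol + dc < cols))).map (fun dc => dcol + dc)).map
            (fun nc => (nc, nr)) := by rw [List.map_map]; rfl
      _ = _ := by rw [h1]
  rw [flatMap_ite_eq_filter]
  have hrow : ((PySem.List.pyRange (-radius) (radius + 1) 1).filter
        (fun dr => decide (0 ≤ drow + dr ∧ drow + dr < rows))).map (fun dr => drow + dr)
      = PySem.List.pyRange (max (drow - radius) 0) (min (drow + radius) (rows - 1) + 1) 1 := by
    have heq : (fun dr : Int => decide (0 ≤ drow + dr ∧ drow + dr < rows))
        = (fun dr : Int => decide (0 ≤ drow + dr) && decide (drow + dr < rows)) := by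
      funext dr; by_cases h1 : (0:Int) ≤ drow + dr <;> by_cases h2 : drow + dr < rows <;> simp [h1, h2]
    have hc : (fun dr : Int => decide (0 ≤ drow + dr) && decide (drow + dr < rows))
        = ((fun x : Int => decide (0 ≤ x) && decide (x < rows)) ∘ (fun dr : Int => drow + dr)) := rfl
    rw [heq, hc, ← List.filter_map, map_add_pyRange]
    have := filter_pyRange_interval (drow + -radius) (drow + (radius + 1)) 0 rows
    convert this using 2 <;> omega
  calc ((PySem.List.pyRange (-radius) (radius + 1) 1).filter
        (fun dr => decide (0 ≤ drow + dr ∧ drow + dr < rows))).flatMap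
        (fun dr => ((PySem.List.pyRange (-radius) (radius + 1) 1).filter
            (fun dc => decide (0 ≤ dcol + dc) && decide (dcol + dc < cols))).map
          (fun dc => (dcol + dc, drow + dr)))
      = ((PySem.List.pyRange (-radius) (radius + 1) 1).filter
        (fun dr => decide (0 ≤ drow + dr ∧ drow + dr < rows))).flatMap
        (fun dr => (PySem.List.pyRange (max (dcol - radius) 0) (min (dcol + radius) (cols - 1) + 1) 1).map
          (fun nc => (nc, drow + dr))) := by
        apply List.flatMap_congr; intro dr _; exact hcol (drow + dr)
    _ = (((PySem.List.pyRange (-radius) (radius + 1) 1).filter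
        (fun dr => decide (0 ≤ drow + dr ∧ drow + dr < rows))).map (fun dr => drow + dr)).flatMap
        (fun nr => (PySem.List.pyRange (max (dcol - radius) 0) (min (dcol + radius) (cols - 1) + 1) 1).map
          (fun nc => (nc, nr))) := by rw [List.flatMap_map]
    _ = _ := by rw [hrow]

-- A's per-tile double loop = folding the tile's clipped rectangle
theorem tile_step_eq (radius rows cols : Int) (t : Int × Int) (mask : PySem.Set (Int × Int)) :
    (PySem.List.pyRange (-radius) (radius + 1) 1).foldl (fun mask dr =>
      (PySem.List.pyRange (-radius) (radius + 1) 1).foldl (fun mask dc =>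
        let nr := t.2 + dr
        let nc := t.1 + dc
        if 0 ≤ nr ∧ nr < rows ∧ 0 ≤ nc ∧ nc < cols then PySem.Set.add mask (nc, nr) else mask)
        mask) mask
    = wfold rows cols radius mask t := by
  unfold wfold
  rw [← window_eq radius rows cols t.1 t.2, ← foldl_set_add_flatMap]
  apply PySem.List.foldl_congr_mem
  intro m dr _
  by_cases hr : 0 ≤ t.2 + dr ∧ t.2 + dr < rows
  · rw [if_pos hr]
    rw [foldl_set_add_ite (p := fun dc => 0 ≤ t.2 + dr ∧ t.2 + dr < rows ∧ 0 ≤ t.1 + dc ∧ t.1 + dc < cols)]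
    congr 1
    congr 1
    apply List.filter_congr
    intro dc _
    by_cases hc1 : (0:Int) ≤ t.1 + dc <;> by_cases hc2 : t.1 + dc < cols <;>
      simp [hc1, hc2, hr.1, hr.2]
  · rw [if_neg hr]
    rw [foldl_set_add_ite (p := fun dc => 0 ≤ t.2 + dr ∧ t.2 + dr < rows ∧ 0 ≤ t.1 + dc ∧ t.1 + dc < cols)]
    have : ((PySem.List.pyRange (-radius) (radius + 1) 1).filter
        (fun dc => decide (0 ≤ t.2 + dr ∧ t.2 + dr < rows ∧ 0 ≤ t.1 + dc ∧ t.1 + dc < cols))) = [] := by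
      apply List.filter_eq_nil_iff.mpr
      intro dc _
      simp only [decide_eq_true_eq]
      tauto
    rw [this]
    rfl

theorem pyRange_one_nil {a b : Int} (h : b ≤ a) : PySem.List.pyRange a b 1 = [] := by
  rw [PySem.List.pyRange_one]
  have : (b - a).toNat = 0 := by omega
  simp [this]

theorem mem_Wrect {x : Int × Int} {rlo rhi clo chi : Int} :
    x ∈ Wrect rlo rhi clo chi ↔ clo ≤ x.1 ∧ x.1 ≤ chi ∧ rlo ≤ x.2 ∧ x.2 ≤ rhi := by
  unfold Wrect
  simp [List.mem_flatMap, PySem.List.mem_pyRange_one]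
  constructor
  · rintro ⟨nr, ⟨h1, h2⟩, nc, ⟨h3, h4⟩, rfl⟩; omega
  · rintro ⟨h1, h2, h3, h4⟩
    exact ⟨x.2, by omega, x.1, by omega, rfl⟩

-- B's nested row/column add-loops fold the clipped rectangle list
theorem foldl_nested_W (rlo rhi clo chi : Int) (m : PySem.Set (Int × Int)) :
    (PySem.List.pyRange rlo (rhi + 1) 1).foldl (fun m nr =>
        (PySem.List.pyRange clo (chi + 1) 1).foldl (fun m nc => PySem.Set.add m (nc, nr)) m) m
      = (Wrect rlo rhi clo chi).foldl PySem.Set.add m := by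
  unfold Wrect
  rw [List.foldl_flatMap]
  apply PySem.List.foldl_congr_mem
  intro m nr _
  rw [List.foldl_map]

theorem mem_foldl_add_of_mem {α : Type} [BEq α] [LawfulBEq α] {x : α} (l : List α)
    (m : PySem.Set α) (h : x ∈ m) : x ∈ l.foldl PySem.Set.add m := by
  induction l generalizing m with
  | nil => exact h
  | cons a l ih => exact ih _ ((PySem.Set.mem_add _ _ _).mpr (Or.inl h))

theorem mem_foldl_add_self {α : Type} [BEq α] [LawfulBEq α] {x : α} (l : List α)
    (m : PySem.Set α) (h : x ∈ l) : x ∈ l.foldl PySem.Set.add m := by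
  induction l generalizing m with
  | nil => cases h
  | cons a l ih =>
    rw [List.foldl_cons]
    rcases List.mem_cons.mp h with rfl | hx
    · exact mem_foldl_add_of_mem l _ ((PySem.Set.mem_add _ _ _).mpr (Or.inr rfl))
    · exact ih _ hx

theorem foldl_add_skip {α : Type} [BEq α] [LawfulBEq α] (l : List α) (m : PySem.Set α)
    (h : ∀ x ∈ l, x ∈ m) : l.foldl PySem.Set.add m = m := by
  induction l with
  | nil => rfl
  | cons a l ih =>
    rw [List.foldl_cons, PySem.Set.add_of_mem (h a (by simp))]
    exact ih (fun x hx => h x (by simp [hx]))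

theorem foldl_add_filter {α : Type} [BEq α] [LawfulBEq α] (p : α → Bool) (l : List α)
    (m : PySem.Set α) (h : ∀ x ∈ l, p x = false → x ∈ m) :
    l.foldl PySem.Set.add m = (l.filter p).foldl PySem.Set.add m := by
  induction l generalizing m with
  | nil => rfl
  | cons a l ih =>
    rw [List.foldl_cons, List.filter_cons]
    by_cases hp : p a
    · rw [if_pos hp, List.foldl_cons]
      exact ih _ (fun x hx hpx => (PySem.Set.mem_add _ _ _).mpr (Or.inl (h x (by simp [hx]) hpx)))
    · rw [if_neg hp, PySem.Set.add_of_mem (h a (by simp) (by simpa using hp))]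
      exact ih _ (fun x hx hpx => h x (by simp [hx]) hpx)

theorem filter_range_gt (lo hi k : Int) :
    (PySem.List.pyRange lo hi 1).filter (fun x => decide (k < x))
      = PySem.List.pyRange (max lo (k + 1)) hi 1 := by
  have h1 : (PySem.List.pyRange lo hi 1).filter (fun x => decide (k < x))
      = (PySem.List.pyRange lo hi 1).filter (fun x => decide (k + 1 ≤ x) && decide (x < hi)) := by
    apply List.filter_congr
    intro x hx
    have := PySem.List.mem_pyRange_one.mp hx
    by_cases h : k < x <;> simp [h] <;> omega
  rw [h1, filter_pyRange_interval lo hi (k + 1) hi, min_self]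

-- sweep step, horizontal: the full rectangle of the next door tile folds like its fresh columns
theorem crux_h (m : PySem.Set (Int × Int)) (rlo rhi cprev c cols radius : Int)
    (hc : c = cprev + 1) (hrad : 0 ≤ radius) (hcols : 0 ≤ cols) (hcp : -1 ≤ cprev + radius)
    (hm : ∀ x ∈ Wrect rlo rhi (max (cprev - radius) 0) (min (cprev + radius) (cols - 1)), x ∈ m) :
    (Wrect rlo rhi (max (c - radius) 0) (min (c + radius) (cols - 1))).foldl PySem.Set.add m
      = (Wrect rlo rhi (min (cprev + radius) (cols - 1) + 1)
          (min (c + radius) (cols - 1))).foldl PySem.Set.add m := by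
  rw [foldl_add_filter (fun x => decide (min (cprev + radius) (cols - 1) < x.1)) _ m
    (by
      intro x hx hpx
      apply hm
      rw [mem_Wrect] at hx ⊢
      simp at hpx
      omega)]
  congr 1
  unfold Wrect
  rw [List.filter_flatMap]
  apply List.flatMap_congr
  intro nr _
  rw [List.filter_map]
  have hcomp : ((fun x : Int × Int => decide (min (cprev + radius) (cols - 1) < x.1)) ∘ fun nc => (nc, nr))
      = fun nc : Int => decide (min (cprev + radius) (cols - 1) < nc) := rfl
  rw [hcomp, filter_range_gt]
  have : max (max (c - radius) 0) (min (cprev + radius) (cols - 1) + 1)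
        = min (cprev + radius) (cols - 1) + 1
      ∨ (min (c + radius) (cols - 1) + 1 ≤ max (max (c - radius) 0) (min (cprev + radius) (cols - 1) + 1)
        ∧ min (c + radius) (cols - 1) + 1 ≤ min (cprev + radius) (cols - 1) + 1) := by omega
  rcases this with h | ⟨h1, h2⟩
  · rw [h]
  · rw [pyRange_one_nil h1, pyRange_one_nil h2]

-- sweep step, vertical: the full rectangle of the next door tile folds like its fresh rows
theorem crux_v (m : PySem.Set (Int × Int)) (clo chi rprev r rows radius : Int)
    (hr : r = rprev + 1) (hrad : 0 ≤ radius) (hrows : 0 ≤ rows) (hrp : -1 ≤ rprev + radius)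
    (hm : ∀ x ∈ Wrect (max (rprev - radius) 0) (min (rprev + radius) (rows - 1)) clo chi, x ∈ m) :
    (Wrect (max (r - radius) 0) (min (r + radius) (rows - 1)) clo chi).foldl PySem.Set.add m
      = (Wrect (min (rprev + radius) (rows - 1) + 1)
          (min (r + radius) (rows - 1)) clo chi).foldl PySem.Set.add m := by
  rw [foldl_add_filter (fun x => decide (min (rprev + radius) (rows - 1) < x.2)) _ m
    (by
      intro x hx hpx
      apply hm
      rw [mem_Wrect] at hx ⊢
      simp at hpx
      omega)]
  congr 1
  unfold Wrect
  rw [List.filter_flatMap]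
  have hinner : ∀ nr : Int,
      ((PySem.List.pyRange clo (chi + 1) 1).map (fun nc => (nc, nr))).filter
          (fun x => decide (min (rprev + radius) (rows - 1) < x.2))
        = if min (rprev + radius) (rows - 1) < nr
            then (PySem.List.pyRange clo (chi + 1) 1).map (fun nc => (nc, nr)) else [] := by
    intro nr
    by_cases h : min (rprev + radius) (rows - 1) < nr
    · rw [if_pos h]
      apply List.filter_eq_self.mpr
      intro x hx
      rcases List.mem_map.mp hx with ⟨nc, _, rfl⟩
      simpa using h
    · rw [if_neg h]
      apply List.filter_eq_nil_iff.mpr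
      intro x hx
      rcases List.mem_map.mp hx with ⟨nc, _, rfl⟩
      simpa using h
  calc (PySem.List.pyRange (max (r - radius) 0) (min (r + radius) (rows - 1) + 1) 1).flatMap
        (fun nr => ((PySem.List.pyRange clo (chi + 1) 1).map (fun nc => (nc, nr))).filter
          (fun x => decide (min (rprev + radius) (rows - 1) < x.2)))
      = (PySem.List.pyRange (max (r - radius) 0) (min (r + radius) (rows - 1) + 1) 1).flatMap
        (fun nr => if min (rprev + radius) (rows - 1) < nr
            then (PySem.List.pyRange clo (chi + 1) 1).map (fun nc => (nc, nr)) else []) := by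
        apply List.flatMap_congr; intro nr _; exact hinner nr
    _ = ((PySem.List.pyRange (max (r - radius) 0) (min (r + radius) (rows - 1) + 1) 1).filter
          (fun nr => decide (min (rprev + radius) (rows - 1) < nr))).flatMap
        (fun nr => (PySem.List.pyRange clo (chi + 1) 1).map (fun nc => (nc, nr))) := by
        rw [flatMap_ite_eq_filter]
    _ = _ := by
        rw [filter_range_gt]
        have : max (max (r - radius) 0) (min (rprev + radius) (rows - 1) + 1)
              = min (rprev + radius) (rows - 1) + 1
            ∨ (min (r + radius) (rows - 1) + 1
                ≤ max (max (r - radius) 0) (min (rprev + radius) (rows - 1) + 1)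
              ∧ min (r + radius) (rows - 1) + 1 ≤ min (rprev + radius) (rows - 1) + 1) := by omega
        rcases this with h | ⟨h1, h2⟩
        · rw [h]
        · rw [pyRange_one_nil h1, pyRange_one_nil h2]

-- the raw interleaved door-tile list exactly as _door_tile_set inserts it
def hTiles (mid_col rows : Int) (top bottom : Bool) : List (Int × Int) :=
  [(-1 : Int), 0, 1].flatMap (fun dc =>
    (if top then [(mid_col + dc, (0 : Int))] else [])
      ++ (if bottom then [(mid_col + dc, rows - 1)] else []))

def vTiles (mid_row cols : Int) (left right : Bool) : List (Int × Int) :=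
  [(-1 : Int), 0, 1].flatMap (fun dr =>
    (if left then [((0 : Int), mid_row + dr)] else [])
      ++ (if right then [(cols - 1, mid_row + dr)] else []))

-- _door_tile_set's two conditional-add loops build exactly the Set of that raw list
theorem cond_fold_eq (mid_col mid_row rows cols : Int) (t b l r : Bool) (s : PySem.Set (Int × Int)) :
    ([(-1 : Int), 0, 1].foldl (fun res dr =>
        let res := if l then PySem.Set.add res (0, mid_row + dr) else res
        if r then PySem.Set.add res (cols - 1, mid_row + dr) else res)
      ([(-1 : Int), 0, 1].foldl (fun res dc =>
        let res := if t then PySem.Set.add res (mid_col + dc, 0) else res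
        if b then PySem.Set.add res (mid_col + dc, rows - 1) else res) s))
    = (hTiles mid_col rows t b ++ vTiles mid_row cols l r).foldl PySem.Set.add s := by
  cases t <;> cases b <;> cases l <;> cases r <;> simp [hTiles, vTiles]

-- folding windows over set(l) = folding windows over l itself (duplicate tiles are no-ops)
theorem mem_foldl_wfold_of_mem {τ α : Type} [BEq α] [LawfulBEq α] (W : τ → List α) {x : α}
    (s : List τ) (m : PySem.Set α) (h : x ∈ m) :
    x ∈ s.foldl (fun m t => (W t).foldl PySem.Set.add m) m := by
  induction s generalizing m with
  | nil => exact h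
  | cons a s ih => exact ih _ (mem_foldl_add_of_mem _ _ h)

theorem mem_foldl_wfold_self {τ α : Type} [BEq α] [LawfulBEq α] (W : τ → List α) {t : τ} {x : α}
    (s : List τ) (m : PySem.Set α) (ht : t ∈ s) (hx : x ∈ W t) :
    x ∈ s.foldl (fun m t => (W t).foldl PySem.Set.add m) m := by
  induction s generalizing m with
  | nil => cases ht
  | cons a s ih =>
    rw [List.foldl_cons]
    rcases List.mem_cons.mp ht with rfl | hts
    · exact mem_foldl_wfold_of_mem W s _ (mem_foldl_add_self _ _ hx)
    · exact ih _ hts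

theorem foldl_windows_dedup {τ α : Type} [BEq τ] [LawfulBEq τ] [BEq α] [LawfulBEq α]
    (W : τ → List α) :
    ∀ (l : List τ) (s : PySem.Set τ) (m : PySem.Set α),
    (l.foldl PySem.Set.add s).foldl (fun m t => (W t).foldl PySem.Set.add m) m
      = l.foldl (fun m t => (W t).foldl PySem.Set.add m)
          (s.foldl (fun m t => (W t).foldl PySem.Set.add m) m) := by
  intro l
  induction l with
  | nil => intro s m; rfl
  | cons t l ih =>
    intro s m
    rw [List.foldl_cons, ih (PySem.Set.add s t) m, List.foldl_cons]
    congr 1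
    by_cases ht : t ∈ s
    · rw [PySem.Set.add_of_mem ht]
      exact (foldl_add_skip _ _ (fun x hx => mem_foldl_wfold_self W s m ht hx)).symm
    · rw [PySem.Set.add_of_not_mem ht, List.foldl_append, List.foldl_cons, List.foldl_nil]


theorem strip_h (rows cols mid_col radius : Int) (top bottom : Bool)
    (hrad : 0 ≤ radius) (hcols : 0 ≤ cols) (hmc : 0 ≤ mid_col) (m : PySem.Set (Int × Int)) :
    ([(-1 : Int), 0, 1].foldl (hStripStep cols rows mid_col radius top bottom) (m, none, none)).1
      = (hTiles mid_col rows top bottom).foldl (wfold rows cols radius) m := by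
  cases top <;> cases bottom
  · simp [hStripStep, hTiles]
  · -- bottom only
    simp only [hStripStep, hTiles, List.foldl_cons, List.foldl_nil, List.flatMap_cons,
      List.flatMap_nil, List.append_nil, if_true, if_neg (by decide : ¬ (false = true))]
    rw [foldl_nested_W, foldl_nested_W, foldl_nested_W]
    simp only [List.cons_append, List.nil_append, List.foldl_cons, List.foldl_nil]
    unfold wfold
    rw [crux_h _ (max (rows - 1 - radius) 0) (min (rows - 1 + radius) (rows - 1))
        (mid_col + 0) (mid_col + 1) cols radius (by omega) hrad hcols (by omega)
        (fun x hx => mem_foldl_add_self _ _ hx)]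
    rw [crux_h _ (max (rows - 1 - radius) 0) (min (rows - 1 + radius) (rows - 1))
        (mid_col + -1) (mid_col + 0) cols radius (by omega) hrad hcols (by omega)
        (fun x hx => mem_foldl_add_self _ _ hx)]
  · -- top only
    simp only [hStripStep, hTiles, List.foldl_cons, List.foldl_nil, List.flatMap_cons,
      List.flatMap_nil, List.append_nil, if_true, if_neg (by decide : ¬ (false = true))]
    rw [foldl_nested_W, foldl_nested_W, foldl_nested_W]
    simp only [List.cons_append, List.nil_append, List.foldl_cons, List.foldl_nil]
    unfold wfold
    rw [crux_h _ (max (0 - radius) 0) (min (0 + radius) (rows - 1))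
        (mid_col + 0) (mid_col + 1) cols radius (by omega) hrad hcols (by omega)
        (fun x hx => mem_foldl_add_self _ _ hx)]
    rw [crux_h _ (max (0 - radius) 0) (min (0 + radius) (rows - 1))
        (mid_col + -1) (mid_col + 0) cols radius (by omega) hrad hcols (by omega)
        (fun x hx => mem_foldl_add_self _ _ hx)]
  · -- top and bottom
    simp only [hStripStep, hTiles, List.foldl_cons, List.foldl_nil, List.flatMap_cons,
      List.flatMap_nil, List.append_nil, if_true]
    rw [foldl_nested_W, foldl_nested_W, foldl_nested_W, foldl_nested_W, foldl_nested_W,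
      foldl_nested_W]
    simp only [List.cons_append, List.nil_append, List.foldl_cons, List.foldl_nil]
    unfold wfold
    rw [crux_h _ (max (rows - 1 - radius) 0) (min (rows - 1 + radius) (rows - 1))
        (mid_col + 0) (mid_col + 1) cols radius (by omega) hrad hcols (by omega)
        (fun x hx => mem_foldl_add_of_mem _ _ (mem_foldl_add_self _ _ hx))]
    rw [crux_h _ (max (0 - radius) 0) (min (0 + radius) (rows - 1))
        (mid_col + 0) (mid_col + 1) cols radius (by omega) hrad hcols (by omega)
        (fun x hx => mem_foldl_add_of_mem _ _ (mem_foldl_add_self _ _ hx))]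
    rw [crux_h _ (max (rows - 1 - radius) 0) (min (rows - 1 + radius) (rows - 1))
        (mid_col + -1) (mid_col + 0) cols radius (by omega) hrad hcols (by omega)
        (fun x hx => mem_foldl_add_of_mem _ _ (mem_foldl_add_self _ _ hx))]
    rw [crux_h _ (max (0 - radius) 0) (min (0 + radius) (rows - 1))
        (mid_col + -1) (mid_col + 0) cols radius (by omega) hrad hcols (by omega)
        (fun x hx => mem_foldl_add_of_mem _ _ (mem_foldl_add_self _ _ hx))]

theorem strip_v (rows cols mid_row radius : Int) (left right : Bool)
    (hrad : 0 ≤ radius) (hrows : 0 ≤ rows) (hmr : 0 ≤ mid_row) (m : PySem.Set (Int × Int)) :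
    ([(-1 : Int), 0, 1].foldl (vStripStep cols rows mid_row radius left right) (m, none, none)).1
      = (vTiles mid_row cols left right).foldl (wfold rows cols radius) m := by
  cases left <;> cases right
  · simp [vStripStep, vTiles]
  · -- right only
    simp only [vStripStep, vTiles, List.foldl_cons, List.foldl_nil, List.flatMap_cons,
      List.flatMap_nil, List.append_nil, if_true, if_neg (by decide : ¬ (false = true))]
    rw [foldl_nested_W, foldl_nested_W, foldl_nested_W]
    simp only [List.cons_append, List.nil_append, List.foldl_cons, List.foldl_nil]
    unfold wfold
    rw [crux_v _ (max (cols - 1 - radius) 0) (min (cols - 1 + radius) (cols - 1))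
        (mid_row + 0) (mid_row + 1) rows radius (by omega) hrad hrows (by omega)
        (fun x hx => mem_foldl_add_self _ _ hx)]
    rw [crux_v _ (max (cols - 1 - radius) 0) (min (cols - 1 + radius) (cols - 1))
        (mid_row + -1) (mid_row + 0) rows radius (by omega) hrad hrows (by omega)
        (fun x hx => mem_foldl_add_self _ _ hx)]
  · -- left only
    simp only [vStripStep, vTiles, List.foldl_cons, List.foldl_nil, List.flatMap_cons,
      List.flatMap_nil, List.append_nil, if_true, if_neg (by decide : ¬ (false = true))]
    rw [foldl_nested_W, foldl_nested_W, foldl_nested_W]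
    simp only [List.cons_append, List.nil_append, List.foldl_cons, List.foldl_nil]
    unfold wfold
    rw [crux_v _ (max (0 - radius) 0) (min (0 + radius) (cols - 1))
        (mid_row + 0) (mid_row + 1) rows radius (by omega) hrad hrows (by omega)
        (fun x hx => mem_foldl_add_self _ _ hx)]
    rw [crux_v _ (max (0 - radius) 0) (min (0 + radius) (cols - 1))
        (mid_row + -1) (mid_row + 0) rows radius (by omega) hrad hrows (by omega)
        (fun x hx => mem_foldl_add_self _ _ hx)]
  · -- left and right
    simp only [vStripStep, vTiles, List.foldl_cons, List.foldl_nil, List.flatMap_cons,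
      List.flatMap_nil, List.append_nil, if_true]
    rw [foldl_nested_W, foldl_nested_W, foldl_nested_W, foldl_nested_W, foldl_nested_W,
      foldl_nested_W]
    simp only [List.cons_append, List.nil_append, List.foldl_cons, List.foldl_nil]
    unfold wfold
    rw [crux_v _ (max (cols - 1 - radius) 0) (min (cols - 1 + radius) (cols - 1))
        (mid_row + 0) (mid_row + 1) rows radius (by omega) hrad hrows (by omega)
        (fun x hx => mem_foldl_add_of_mem _ _ (mem_foldl_add_self _ _ hx))]
    rw [crux_v _ (max (0 - radius) 0) (min (0 + radius) (cols - 1))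
        (mid_row + 0) (mid_row + 1) rows radius (by omega) hrad hrows (by omega)
        (fun x hx => mem_foldl_add_of_mem _ _ (mem_foldl_add_self _ _ hx))]
    rw [crux_v _ (max (cols - 1 - radius) 0) (min (cols - 1 + radius) (cols - 1))
        (mid_row + -1) (mid_row + 0) rows radius (by omega) hrad hrows (by omega)
        (fun x hx => mem_foldl_add_of_mem _ _ (mem_foldl_add_self _ _ hx))]
    rw [crux_v _ (max (0 - radius) 0) (min (0 + radius) (cols - 1))
        (mid_row + -1) (mid_row + 0) rows radius (by omega) hrad hrows (by omega)
        (fun x hx => mem_foldl_add_of_mem _ _ (mem_foldl_add_self _ _ hx))]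

theorem foldl_id {α β : Type} : ∀ (l : List β) (m : α), l.foldl (fun m _ => m) m = m := by
  intro l
  induction l with
  | nil => intro m; rfl
  | cons a l ih => intro m; exact ih m

theorem wfold_neg (rows cols radius : Int) (h : radius < 0) (m : PySem.Set (Int × Int))
    (t : Int × Int) : wfold rows cols radius m t = m := by
  unfold wfold Wrect
  rw [pyRange_one_nil (show min (t.2 + radius) (rows - 1) + 1 ≤ max (t.2 - radius) 0 by omega)]
  rfl

theorem hstep_neg (cols rows mid_col radius : Int) (top bottom : Bool) (h : radius < 0) :
    ∀ (st : PySem.Set (Int × Int) × Option Int × Option Int) (d : Int),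
      (hStripStep cols rows mid_col radius top bottom st d).1 = st.1 := by
  intro st d
  unfold hStripStep
  rw [pyRange_one_nil (show min (0 + radius) (rows - 1) + 1 ≤ max (0 - radius) 0 by omega),
      pyRange_one_nil (show min (rows - 1 + radius) (rows - 1) + 1 ≤ max (rows - 1 - radius) 0 by omega)]
  cases top <;> cases bottom <;> simp

theorem vstep_neg (cols rows mid_row radius : Int) (left right : Bool) (h : radius < 0) :
    ∀ (st : PySem.Set (Int × Int) × Option Int × Option Int) (d : Int),
      (vStripStep cols rows mid_row radius left right st d).1 = st.1 := by
  intro st d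
  unfold vStripStep
  rw [pyRange_one_nil (show min (0 + radius) (cols - 1) + 1 ≤ max (0 - radius) 0 by omega),
      pyRange_one_nil (show min (cols - 1 + radius) (cols - 1) + 1 ≤ max (cols - 1 - radius) 0 by omega)]
  cases left <;> cases right <;> simp

theorem foldl_fst_inv {σ ρ τ : Type} {f : σ × ρ → τ → σ × ρ} (h : ∀ st d, (f st d).1 = st.1) :
    ∀ (l : List τ) (st : σ × ρ), (l.foldl f st).1 = st.1 := by
  intro l
  induction l with
  | nil => intro st; rfl
  | cons a l ih => intro st; rw [List.foldl_cons, ih, h]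

-- A as a fold of clipped rectangles over its door-tile set
theorem bridgeA (grid : List (List Int)) (doors : List (String × Bool)) (radius : Int) :
    door_buffer_mask_py grid doors radius
      = (door_tile_set grid doors).foldl
          (wfold (grid.length : Int)
            (colsOf grid) radius)
          PySem.Set.empty := by
  cases grid <;>
    (unfold door_buffer_mask_py
     apply PySem.List.foldl_congr_mem
     intro m t _
     exact tile_step_eq radius _ _ t m)

-- the door-tile set as the Set of the raw interleaved tile list
theorem bridgeT (grid : List (List Int)) (doors : List (String × Bool)) :
    door_tile_set grid doors
      = (hTiles (PySem.Int.floordiv (colsOf grid) 2)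
            (grid.length : Int)
            (PySem.Dict.getD (PySem.Dict.mk doors) "top" false)
            (PySem.Dict.getD (PySem.Dict.mk doors) "bottom" false)
          ++ vTiles (PySem.Int.floordiv (grid.length : Int) 2)
            (colsOf grid)
            (PySem.Dict.getD (PySem.Dict.mk doors) "left" false)
            (PySem.Dict.getD (PySem.Dict.mk doors) "right" false)).foldl
          PySem.Set.add PySem.Set.empty := by
  cases grid <;>
    (unfold door_tile_set
     exact cond_fold_eq _ _ _ _ _ _ _ _ _)

-- B unfolded to its two strip sweeps
theorem bridgeB (grid : List (List Int)) (doors : List (String × Bool)) (radius : Int) :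
    door_buffer_mask_py_alt grid doors radius
      = ([(-1 : Int), 0, 1].foldl
          (vStripStep (colsOf grid)
            (grid.length : Int) (PySem.Int.floordiv (grid.length : Int) 2) radius
            (PySem.Dict.getD (PySem.Dict.mk doors) "left" false)
            (PySem.Dict.getD (PySem.Dict.mk doors) "right" false))
          ((([(-1 : Int), 0, 1].foldl
              (hStripStep (colsOf grid)
                (grid.length : Int)
                (PySem.Int.floordiv (colsOf grid) 2)
                radius
                (PySem.Dict.getD (PySem.Dict.mk doors) "top" false)
                (PySem.Dict.getD (PySem.Dict.mk doors) "bottom" false))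
              (PySem.Set.empty, none, none)).1), none, none)).1 := by
  cases grid <;> rfl

theorem foldl_wfold_dedup (rows cols radius : Int) (l : List (Int × Int))
    (s : PySem.Set (Int × Int)) (m : PySem.Set (Int × Int)) :
    (l.foldl PySem.Set.add s).foldl (wfold rows cols radius) m
      = l.foldl (wfold rows cols radius) (s.foldl (wfold rows cols radius) m) := by
  exact foldl_windows_dedup (fun t => Wrect (max (t.2 - radius) 0) (min (t.2 + radius) (rows - 1))
    (max (t.1 - radius) 0) (min (t.1 + radius) (cols - 1))) l s m

-- ===== VERDICT (by name: the statement is the Claim_ definition above) =====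
theorem door_buffer_mask_py_spec : Claim_equal_door_buffer_mask_py := by
  intro grid doors radius _
  unfold Spec_door_buffer_mask_py
  have hcols : (0 : Int) ≤ (colsOf grid) := by
    cases grid <;> simp [colsOf]
  have hrows : (0 : Int) ≤ (grid.length : Int) := Int.natCast_nonneg _
  have hmc : (0 : Int) ≤ PySem.Int.floordiv (colsOf grid) 2 := by
    rw [PySem.Int.floordiv_eq_ediv_of_pos (by norm_num)]
    exact Int.ediv_nonneg hcols (by norm_num)
  have hmr : (0 : Int) ≤ PySem.Int.floordiv (grid.length : Int) 2 := by
    rw [PySem.Int.floordiv_eq_ediv_of_pos (by norm_num)]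
    exact Int.ediv_nonneg hrows (by norm_num)
  rcases lt_or_ge radius 0 with hneg | hrad
  · rw [bridgeA, bridgeB]
    rw [foldl_fst_inv (vstep_neg _ _ _ _ _ _ hneg), foldl_fst_inv (hstep_neg _ _ _ _ _ _ hneg)]
    have h2 : (door_tile_set grid doors).foldl
          (wfold (grid.length : Int) (colsOf grid) radius) PySem.Set.empty
        = (door_tile_set grid doors).foldl (fun m _ => m) PySem.Set.empty := by
      apply PySem.List.foldl_congr_mem
      intro m t _
      exact wfold_neg _ _ _ hneg m t
    rw [h2, foldl_id]
  · rw [bridgeA, bridgeT, foldl_wfold_dedup, bridgeB]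
    rw [strip_h _ _ _ radius _ _ hrad hcols hmc PySem.Set.empty]
    rw [strip_v _ _ _ radius _ _ hrad hrows hmr _]
    simp only [PySem.Set.empty, List.foldl_nil, List.foldl_append]
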